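-- pv_equiv track=rewrite | github.com/CardinisCode/learning-python | finalproblems/finalproblem10testing.py | find_double_pairs_in_message
-- ===== SOURCE A (Python) =====
-- def find_double_pairs_in_message(my_message_to_be_modified):
--     updated_message = ""
--     second_char_index = 1
--     prev_index = 0
--     for index in range(0, len(my_message_to_be_modified)):
--         current_letter = my_message_to_be_modified[index]
--         if index == second_char_index:
--             prev_letter = my_message_to_be_modified[prev_index]
--             if current_letter == prev_letter:
--                 updated_message += "X"
--             else:
--                 updated_message += current_letter
--
--             second_char_index += 3
--             prev_index += 3
--         else:
--             updated_message += current_letter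
--
--     return updated_message
-- ===== SOURCE B (Python) =====
-- def find_double_pairs_in_message(my_message_to_be_modified):
--     result = list(my_message_to_be_modified)
--     for i in range(1, len(my_message_to_be_modified), 3):
--         if my_message_to_be_modified[i] == my_message_to_be_modified[i - 1]:
--             result[i] = "X"
--     return "".join(result)
-- ===== Notes on version B (the rewrite author's own statement) =====
-- stated objective: simpler
-- what changed: Instead of scanning every index while maintaining second_char_index/prev_index counters and appending character by character, B copies the string into a list once and visits only the candidate positions range(1, n, 3), overwriting a repeated character in place.
import Mathlib
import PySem

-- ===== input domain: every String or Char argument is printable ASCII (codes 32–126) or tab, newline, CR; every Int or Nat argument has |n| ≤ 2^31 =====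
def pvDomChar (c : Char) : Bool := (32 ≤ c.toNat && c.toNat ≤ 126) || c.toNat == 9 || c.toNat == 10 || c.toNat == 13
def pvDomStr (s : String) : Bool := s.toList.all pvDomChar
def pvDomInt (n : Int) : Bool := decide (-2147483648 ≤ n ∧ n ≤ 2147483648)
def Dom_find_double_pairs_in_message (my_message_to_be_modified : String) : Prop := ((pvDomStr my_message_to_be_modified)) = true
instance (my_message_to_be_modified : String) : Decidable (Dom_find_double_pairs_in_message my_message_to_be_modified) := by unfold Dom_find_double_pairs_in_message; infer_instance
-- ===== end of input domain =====

-- B replaces A's full index scan with counter bookkeeping by a one-time list copy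
-- modified in place at only the candidate positions range(1, n, 3) (objective: simpler).

-- ===== PORT A =====
-- A: scan every index 0..n-1, carrying (updated_message, second_char_index, prev_index);
-- at index == second_char_index compare with the previous char and advance both counters by 3.
def find_double_pairs_in_message (my_message_to_be_modified : String) : String :=
  let l := my_message_to_be_modified.toList
  let st := (PySem.List.pyRange 0 (l.length : Int) 1).foldl
    (fun (st : List Char × Int × Int) index =>
      let current_letter := PySem.List.pyGetD l index ' '
      if index = st.2.1 then
        let prev_letter := PySem.List.pyGetD l st.2.2 ' '
        (if current_letter = prev_letter then st.1 ++ ['X'] else st.1 ++ [current_letter],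
         st.2.1 + 3, st.2.2 + 3)
      else (st.1 ++ [current_letter], st.2.1, st.2.2))
    (([] : List Char), (1 : Int), (0 : Int))
  String.mk st.1

-- ===== PORT B =====
-- B: copy the characters once, then for i in range(1, n, 3) overwrite result[i] with 'X'
-- when the source has a repeat at i; join at the end.
def find_double_pairs_in_message_alt (my_message_to_be_modified : String) : String :=
  let l := my_message_to_be_modified.toList
  let result := (PySem.List.pyRange 1 (l.length : Int) 3).foldl
    (fun result i =>
      if PySem.List.pyGetD l i ' ' = PySem.List.pyGetD l (i - 1) ' '
      then PySem.List.pySetD result i 'X' else result)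
    l
  String.mk result

-- ===== PRECONDITION & SPEC =====
def Spec_find_double_pairs_in_message (my_message_to_be_modified : String) (out : String) : Prop := out = find_double_pairs_in_message_alt my_message_to_be_modified
instance (my_message_to_be_modified : String) (out : String) : Decidable (Spec_find_double_pairs_in_message my_message_to_be_modified out) := by unfold Spec_find_double_pairs_in_message; infer_instance

-- ===== CLAIM (what is proved, stated in full; the proofs are below) =====
def Claim_equal_find_double_pairs_in_message : Prop := ∀ (my_message_to_be_modified : String), Dom_find_double_pairs_in_message my_message_to_be_modified → Spec_find_double_pairs_in_message my_message_to_be_modified (find_double_pairs_in_message my_message_to_be_modified)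

-- ===== LEMMAS AND PROOFS =====

-- The character both programs put at position p.
def pvSpecF (l : List Char) (p : Nat) : Char :=
  if p % 3 = 1 ∧ l.getD p ' ' = l.getD (p - 1) ' ' then 'X' else l.getD p ' '

-- a step-3 range is empty when b ≤ a
theorem pvRange3_nil (a b : Int) (h : b ≤ a) : PySem.List.pyRange a b 3 = [] := by
  rw [PySem.List.pyRange_of_pos a b (by norm_num : (0:Int) < 3), if_neg (by omega)]
  rfl

-- a step-3 range unfolds one element at a time
theorem pvRange3_cons (a b : Int) (h : a < b) :
    PySem.List.pyRange a b 3 = a :: PySem.List.pyRange (a + 3) b 3 := by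
  rw [PySem.List.pyRange_of_pos a b (by norm_num : (0:Int) < 3),
      PySem.List.pyRange_of_pos (a + 3) b (by norm_num : (0:Int) < 3), if_pos h]
  by_cases h3 : a + 3 < b
  · rw [if_pos h3]
    have hm : ((b - a + 3 - 1) / 3).toNat = ((b - (a + 3) + 3 - 1) / 3).toNat + 1 := by omega
    rw [hm, List.range_succ_eq_map, List.map_cons, List.map_map]
    refine congrArg₂ List.cons (by ring) ?_
    refine List.map_congr_left ?_
    intro k _
    simp only [Function.comp_apply, Nat.succ_eq_add_one]
    push_cast
    ring
  · rw [if_neg h3]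
    have hm : ((b - a + 3 - 1) / 3).toNat = 1 := by omega
    rw [hm]
    simp

-- getD after set
theorem pvGetD_set (r : List Char) (i p : Nat) (v d : Char) :
    (r.set i v).getD p d = if p = i ∧ i < r.length then v else r.getD p d := by
  simp only [List.getD, List.getElem?_set]
  by_cases hpi : i = p
  · subst hpi
    by_cases hl : i < r.length
    · simp [hl]
    · simp [hl]
  · rw [if_neg hpi, if_neg (fun h => hpi h.1.symm)]

-- A's loop invariant
theorem pvA_loop (l : List Char) : ∀ (fuel j sci : Nat) (acc : List Char),
    l.length ≤ j + fuel → j ≤ sci → sci < j + 3 → sci % 3 = 1 →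
    ((PySem.List.pyRange (j : Int) (l.length : Int) 1).foldl
      (fun (st : List Char × Int × Int) index =>
        let current_letter := PySem.List.pyGetD l index ' '
        if index = st.2.1 then
          let prev_letter := PySem.List.pyGetD l st.2.2 ' '
          (if current_letter = prev_letter then st.1 ++ ['X'] else st.1 ++ [current_letter],
           st.2.1 + 3, st.2.2 + 3)
        else (st.1 ++ [current_letter], st.2.1, st.2.2))
      (acc, (sci : Int), (sci : Int) - 1)).1
    = acc ++ (List.range' j (l.length - j)).map (pvSpecF l) := by
  intro fuel
  induction fuel with
  | zero =>
    intro j sci acc hle hj1 hj2 hmod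
    rw [PySem.List.pyRange_one_eq_nil (by exact_mod_cast hle : (l.length : Int) ≤ (j : Int))]
    simp [Nat.sub_eq_zero_of_le (by omega : l.length ≤ j)]
  | succ fuel ih =>
    intro j sci acc hle hj1 hj2 hmod
    by_cases hjn : j < l.length
    · rw [PySem.List.pyRange_one_cons (by exact_mod_cast hjn : (j : Int) < (l.length : Int))]
      rw [List.foldl_cons]
      have hrng : l.length - j = (l.length - (j + 1)) + 1 := by omega
      rw [hrng, List.range'_succ, List.map_cons]
      by_cases hsc : j = sci
      · subst hsc
        have hone : (1 : Nat) ≤ j := by omega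
        have hprev : (j : Int) - 1 = ((j - 1 : Nat) : Int) := by omega
        have hc3 : ((j : Int) + 3) = (((j + 3 : Nat)) : Int) := by push_cast; ring
        have hc3' : (((j - 1 : Nat) : Int)) + 3 = (((j + 3 : Nat)) : Int) - 1 := by omega
        have hc1 : ((j : Int) + 1) = (((j + 1 : Nat)) : Int) := by push_cast; ring
        have hspec : pvSpecF l j =
            if l.getD j ' ' = l.getD (j - 1) ' ' then 'X' else l.getD j ' ' := by
          unfold pvSpecF
          by_cases hcc : l.getD j ' ' = l.getD (j - 1) ' '
          · rw [if_pos ⟨hmod, hcc⟩, if_pos hcc]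
          · rw [if_neg (fun h => hcc h.2), if_neg hcc]
        rw [hspec]
        simp only [hprev, PySem.List.pyGetD_natCast, if_true, hc3, hc3', hc1]
        by_cases hc : l.getD j ' ' = l.getD (j - 1) ' '
        · rw [if_pos hc, if_pos hc,
              ih (j + 1) (j + 3) (acc ++ ['X']) (by omega) (by omega) (by omega) (by omega)]
          simp
        · rw [if_neg hc, if_neg hc,
              ih (j + 1) (j + 3) (acc ++ [l.getD j ' ']) (by omega) (by omega) (by omega) (by omega)]
          simp
      · have hne : ((j : Int)) ≠ ((sci : Int)) := by exact_mod_cast hsc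
        have hc1 : ((j : Int) + 1) = (((j + 1 : Nat)) : Int) := by push_cast; ring
        have hspec : pvSpecF l j = l.getD j ' ' := by
          unfold pvSpecF
          exact if_neg (fun h => absurd h.1 (by omega))
        rw [hspec]
        simp only [if_neg hne, PySem.List.pyGetD_natCast, hc1]
        rw [ih (j + 1) sci (acc ++ [l.getD j ' ']) (by omega) (by omega) (by omega) hmod]
        simp
    · rw [PySem.List.pyRange_one_eq_nil (by exact_mod_cast (by omega : l.length ≤ j) : (l.length : Int) ≤ (j : Int))]
      simp [Nat.sub_eq_zero_of_le (by omega : l.length ≤ j)]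

-- B's fold preserves length
theorem pvB_len (l : List Char) (rng : List Int) (r : List Char) :
    (rng.foldl
      (fun result i =>
        if PySem.List.pyGetD l i ' ' = PySem.List.pyGetD l (i - 1) ' '
        then PySem.List.pySetD result i 'X' else result) r).length = r.length := by
  induction rng generalizing r with
  | nil => rfl
  | cons x xs ih =>
    simp only [List.foldl_cons]
    split
    · rw [ih]; simp [PySem.List.length_pySetD]
    · rw [ih]

-- B's loop invariant, pointwise
theorem pvB_get (l : List Char) : ∀ (fuel i : Nat) (r : List Char),
    i % 3 = 1 → r.length = l.length → l.length ≤ i + fuel → ∀ (p : Nat),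
    ((PySem.List.pyRange (i : Int) (l.length : Int) 3).foldl
      (fun result i =>
        if PySem.List.pyGetD l i ' ' = PySem.List.pyGetD l (i - 1) ' '
        then PySem.List.pySetD result i 'X' else result) r).getD p ' '
    = if i ≤ p ∧ p % 3 = 1 ∧ p < l.length ∧ l.getD p ' ' = l.getD (p - 1) ' '
      then 'X' else r.getD p ' ' := by
  intro fuel
  induction fuel with
  | zero =>
    intro i r hi hr hle p
    rw [pvRange3_nil _ _ (by exact_mod_cast hle : (l.length : Int) ≤ (i : Int))]
    rw [List.foldl_nil, if_neg (by omega)]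
  | succ fuel ih =>
    intro i r hi hr hle p
    by_cases hin : i < l.length
    · rw [pvRange3_cons _ _ (by exact_mod_cast hin : (i : Int) < (l.length : Int))]
      rw [List.foldl_cons]
      have hprev : (i : Int) - 1 = ((i - 1 : Nat) : Int) := by omega
      have hc3 : ((i : Int) + 3) = (((i + 3 : Nat)) : Int) := by push_cast; ring
      by_cases hc : l.getD i ' ' = l.getD (i - 1) ' '
      · rw [if_pos (by rw [hprev, PySem.List.pyGetD_natCast, PySem.List.pyGetD_natCast]; exact hc)]
        rw [PySem.List.pySetD_natCast, hc3,
            ih (i + 3) (r.set i 'X') (by omega) (by simp [hr]) (by omega) p]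
        by_cases hpi : p = i
        · subst hpi
          rw [if_neg (fun h => absurd h.1 (by omega)), pvGetD_set,
              if_pos ⟨rfl, by omega⟩, if_pos ⟨le_refl p, hi, hin, hc⟩]
        · have hset : (r.set i 'X').getD p ' ' = r.getD p ' ' := by
            rw [pvGetD_set, if_neg (fun h => hpi h.1)]
          rw [hset]
          refine if_congr ⟨fun h => ⟨by rcases h with ⟨h1, h2, h3, h4⟩; omega, h.2⟩,
            fun h => ⟨by rcases h with ⟨h1, h2, h3, h4⟩; omega, h.2⟩⟩ rfl rfl
      · rw [if_neg (by rw [hprev, PySem.List.pyGetD_natCast, PySem.List.pyGetD_natCast]; exact hc)]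
        rw [hc3, ih (i + 3) r (by omega) hr (by omega) p]
        refine if_congr ⟨fun h => ⟨by rcases h with ⟨h1, h2, h3, h4⟩; omega, h.2⟩,
          fun h => ?_⟩ rfl rfl
        refine ⟨?_, h.2⟩
        by_cases hpi : p = i
        · exact absurd (hpi ▸ h.2.2.2) hc
        · rcases h with ⟨h1, h2, h3, h4⟩; omega
    · rw [pvRange3_nil _ _ (by exact_mod_cast (by omega : l.length ≤ i) : (l.length : Int) ≤ (i : Int))]
      rw [List.foldl_nil, if_neg (by omega)]

-- ===== VERDICT (by name: the statement is the Claim_ definition above) =====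
theorem find_double_pairs_in_message_spec : Claim_equal_find_double_pairs_in_message := by
  intro m _
  unfold Spec_find_double_pairs_in_message find_double_pairs_in_message find_double_pairs_in_message_alt
  simp only []
  refine congrArg String.mk ?_
  have hA := pvA_loop m.toList m.toList.length 0 1 [] (by omega) (by omega) (by omega) (by omega)
  simp only [Nat.cast_zero, Nat.cast_one, sub_self, List.nil_append, Nat.sub_zero] at hA
  rw [hA]
  refine Eq.symm (List.ext_getElem ?_ ?_)
  · rw [pvB_len]
    simp [List.length_range']
  · intro p hp hp'
    have hpn : p < m.toList.length := by rw [pvB_len] at hp; exact hp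
    have hB := pvB_get m.toList m.toList.length 1 m.toList (by omega) rfl (by omega) p
    simp only [Nat.cast_one] at hB
    rw [← List.getD_eq_getElem _ ' ' hp, ← List.getD_eq_getElem _ ' ' hp', hB]
    have hmap : ((List.range' 0 m.toList.length).map (pvSpecF m.toList)).getD p ' '
        = pvSpecF m.toList p := by
      rw [List.getD_eq_getElem _ ' ' hp']
      simp
    rw [hmap]
    unfold pvSpecF
    refine if_congr ⟨fun h => ⟨h.2.1, h.2.2.2⟩,
      fun h => ⟨by rcases h with ⟨h1, h2⟩; omega, h.1, hpn, h.2⟩⟩ rfl rfl
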